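-- pv_equiv track=rewrite | github.com/lzy1732008/FTgetKey_trainclassier | createDic.py | searchCandidateSet
-- ===== SOURCE A (Python) =====
-- def searchCandidateSet(corpus,corpuscontent):
--     candidate = {}
--     point = 0
--     while point < len(corpus)-1:
--         s2 = str(corpus[point])+str(corpus[point+1])
--         if candidate.get(s2,-1) == -1:
--            num2 = corpuscontent.count(s2)
--            if num2 >= 1:
--                candidate[s2] = num2
--                if point + 2 < len(corpus):
--                    s3 = s2 + corpus[point + 2]
--                    if candidate.get(s3, -1) == -1:
--                        num3 = corpuscontent.count(s3)
--                        if num3 >= 1: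
--                            candidate[s3] = num3
--         else:
--             if point + 2 < len(corpus):
--                 s3 = s2 + corpus[point + 2]
--                 if candidate.get(s3, -1) == -1:
--                     num3 = corpuscontent.count(s3)
--                     if num3 >= 1:
--                         candidate[s3] = num3
--                 # else:
--                 #    num3 = candidate.get(s3)
--                 # if num3 >= 1:
--                 #    candidate[s3] = num3
--                    # if point + 3 <len(corpus):
--                    #      s4 = s3 + corpus[point + 3]
--                    #      if candidate.get(s4, -1) == -1:
--                    #         num4 = corpuscontent.count(s4)
--                    #      else:
--                    #         num4 = candidate.get(s4)
--                    #      if num4 >= 1: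
--                    #         candidate[s4] = num4
--         point += 1
--     return candidate
-- ===== SOURCE B (Python) =====
-- def searchCandidateSet(corpus, corpuscontent):
--     # Two-phase: generate every bigram/trigram candidate in consideration order,
--     # dedup keeping first occurrence, then count each distinct candidate once.
--     # A's gating (trigram only considered when its bigram prefix occurs) is
--     # redundant: if the bigram never occurs in corpuscontent, no extension of it can.
--     n = len(corpus)
--     cands = []
--     for p in range(n - 1):
--         s2 = str(corpus[p]) + str(corpus[p + 1])
--         cands += [s2] + ([s2 + str(corpus[p + 2])] if p + 2 < n else [])
--     result = {}
--     for s in dict.fromkeys(cands):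
--         c = corpuscontent.count(s)
--         if c >= 1:
--             result[s] = c
--     return result
-- ===== Notes on version B (the rewrite author's own statement) =====
-- stated objective: alternative
-- what changed: Replaces A's stateful while-loop (dict lookups gating duplicated bigram/trigram branches) by a two-phase pipeline: generate all bigram/trigram candidates, dedup keeping first occurrence, then count each distinct candidate exactly once; correctness rests on the fact that A's gating is redundant because a trigram can only occur in the content if its bigram prefix does.
import Mathlib
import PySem

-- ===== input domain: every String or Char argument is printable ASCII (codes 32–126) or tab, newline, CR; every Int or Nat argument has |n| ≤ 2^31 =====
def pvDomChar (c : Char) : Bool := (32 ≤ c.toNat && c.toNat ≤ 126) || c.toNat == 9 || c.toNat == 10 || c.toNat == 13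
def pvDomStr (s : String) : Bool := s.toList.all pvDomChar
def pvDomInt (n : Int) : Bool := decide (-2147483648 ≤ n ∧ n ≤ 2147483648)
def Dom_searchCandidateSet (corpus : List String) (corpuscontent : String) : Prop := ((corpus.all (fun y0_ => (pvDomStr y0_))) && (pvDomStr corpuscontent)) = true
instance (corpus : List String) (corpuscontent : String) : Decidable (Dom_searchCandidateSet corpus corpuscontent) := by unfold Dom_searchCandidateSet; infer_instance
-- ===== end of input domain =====

-- B replaces A's stateful gated while-loop by a two-phase pipeline (generate all
-- bigram/trigram candidates, dedup, count each distinct candidate once); same cost,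
-- different structure ("alternative").

-- ===== PORT A =====
def searchCandidateSet (corpus : List String) (corpuscontent : String) : List (String × Int) :=
  ((PySem.List.pyRange 0 ((corpus.length : Int) - 1) 1).foldl
    (fun candidate point =>
      let s2 := PySem.List.pyGetD corpus point "" ++ PySem.List.pyGetD corpus (point + 1) ""
      if candidate.getD s2 (-1) == -1 then
        let num2 : Int := (PySem.Str.count corpuscontent s2 : Int)
        if num2 ≥ 1 then
          let candidate := candidate.insert s2 num2
          if point + 2 < (corpus.length : Int) then
            let s3 := s2 ++ PySem.List.pyGetD corpus (point + 2) ""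
            if candidate.getD s3 (-1) == -1 then
              let num3 : Int := (PySem.Str.count corpuscontent s3 : Int)
              if num3 ≥ 1 then candidate.insert s3 num3 else candidate
            else candidate
          else candidate
        else candidate
      else
        if point + 2 < (corpus.length : Int) then
          let s3 := s2 ++ PySem.List.pyGetD corpus (point + 2) ""
          if candidate.getD s3 (-1) == -1 then
            let num3 : Int := (PySem.Str.count corpuscontent s3 : Int)
            if num3 ≥ 1 then candidate.insert s3 num3 else candidate
          else candidate
        else candidate)
    PySem.Dict.empty).items

-- ===== PORT B =====
def searchCandidateSet_alt (corpus : List String) (corpuscontent : String) : List (String × Int) :=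
  let n : Int := corpus.length
  let cands := (PySem.List.pyRange 0 (n - 1) 1).foldl
    (fun cands p =>
      let s2 := PySem.List.pyGetD corpus p "" ++ PySem.List.pyGetD corpus (p + 1) ""
      cands ++ ([s2] ++ (if p + 2 < n then [s2 ++ PySem.List.pyGetD corpus (p + 2) ""] else [])))
    []
  ((PySem.List.dedup cands).foldl
    (fun result s =>
      let c : Int := (PySem.Str.count corpuscontent s : Int)
      if c ≥ 1 then result.insert s c else result)
    PySem.Dict.empty).items

-- ===== PRECONDITION & SPEC =====
def Spec_searchCandidateSet (corpus : List String) (corpuscontent : String) (out : List (String × Int)) : Prop := out = searchCandidateSet_alt corpus corpuscontent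
instance (corpus : List String) (corpuscontent : String) (out : List (String × Int)) : Decidable (Spec_searchCandidateSet corpus corpuscontent out) := by unfold Spec_searchCandidateSet; infer_instance

-- ===== CLAIM (what is proved, stated in full; the proofs are below) =====
def Claim_equal_searchCandidateSet : Prop := ∀ (corpus : List String) (corpuscontent : String), Dom_searchCandidateSet corpus corpuscontent → Spec_searchCandidateSet corpus corpuscontent (searchCandidateSet corpus corpuscontent)


-- ===== LEMMAS AND PROOFS =====

-- A's loop body, named so the fold can be reasoned about (definitionally the lambda in port A)
def pvStepA (corpus : List String) (content : String) (candidate : PySem.Dict String Int) (point : Int) : PySem.Dict String Int :=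
  let s2 := PySem.List.pyGetD corpus point "" ++ PySem.List.pyGetD corpus (point + 1) ""
  if candidate.getD s2 (-1) == -1 then
    let num2 : Int := (PySem.Str.count content s2 : Int)
    if num2 ≥ 1 then
      let candidate := candidate.insert s2 num2
      if point + 2 < (corpus.length : Int) then
        let s3 := s2 ++ PySem.List.pyGetD corpus (point + 2) ""
        if candidate.getD s3 (-1) == -1 then
          let num3 : Int := (PySem.Str.count content s3 : Int)
          if num3 ≥ 1 then candidate.insert s3 num3 else candidate
        else candidate
      else candidate
    else candidate
  else
    if point + 2 < (corpus.length : Int) then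
      let s3 := s2 ++ PySem.List.pyGetD corpus (point + 2) ""
      if candidate.getD s3 (-1) == -1 then
        let num3 : Int := (PySem.Str.count content s3 : Int)
        if num3 ≥ 1 then candidate.insert s3 num3 else candidate
      else candidate
    else candidate

def pvG2 (corpus : List String) (p : Int) : String :=
  PySem.List.pyGetD corpus p "" ++ PySem.List.pyGetD corpus (p + 1) ""
def pvG3 (corpus : List String) (p : Int) : String :=
  pvG2 corpus p ++ PySem.List.pyGetD corpus (p + 2) ""
def pvCands (corpus : List String) (p : Int) : List String :=
  [pvG2 corpus p] ++ (if p + 2 < (corpus.length : Int) then [pvG3 corpus p] else [])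

-- the "memoized count-or-skip" step both programs reduce to
def pvOp (content : String) (d : PySem.Dict String Int) (s : String) : PySem.Dict String Int :=
  if d.contains s then d
  else if ((PySem.Str.count content s : Int)) ≥ 1 then d.insert s ((PySem.Str.count content s : Int)) else d

-- B's loop body over the deduped candidates (definitionally the lambda in port B)
def pvOpB (content : String) (d : PySem.Dict String Int) (s : String) : PySem.Dict String Int :=
  let c : Int := (PySem.Str.count content s : Int)
  if c ≥ 1 then d.insert s c else d

-- dict invariant: every stored value is the (positive) count of its key
def pvGood (content : String) (d : PySem.Dict String Int) : Prop :=
  ∀ s v, d.get? s = some v → v = (PySem.Str.count content s : Int) ∧ 1 ≤ v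

-- ---- string facts: Python's non-overlapping count is positive iff the pattern occurs ----

theorem pv_go_le (sub : List Char) (fuel : Nat) : ∀ (l : List Char) (acc : Nat),
    acc ≤ PySem.Chars.count.go sub fuel l acc := by
  induction fuel with
  | zero => intro l acc; rw [PySem.Chars.count.go]
  | succ fuel ih =>
    intro l acc
    cases l with
    | nil => rw [PySem.Chars.count.go]; omega
    | cons h t =>
      rw [PySem.Chars.count.go]
      split
      · exact le_trans (Nat.le_succ acc) (ih _ _)
      · exact ih _ _

theorem pv_go_lt_iff (sub : List Char) (hs : sub ≠ []) (fuel : Nat) : ∀ (l : List Char) (acc : Nat),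
    l.length ≤ fuel → (acc < PySem.Chars.count.go sub fuel l acc ↔ sub <:+: l) := by
  induction fuel with
  | zero =>
    intro l acc hl
    have : l = [] := List.eq_nil_of_length_eq_zero (Nat.le_zero.mp hl)
    subst this
    rw [PySem.Chars.count.go]
    simp [List.infix_nil, hs]
  | succ fuel ih =>
    intro l acc hl
    cases l with
    | nil =>
      rw [PySem.Chars.count.go]
      simp [List.infix_nil, hs]
      omega
    | cons h t =>
      rw [PySem.Chars.count.go]
      split
      · rename_i hp
        constructor
        · intro _
          exact ((List.isPrefixOf_iff_prefix).mp hp).isInfix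
        · intro _
          calc acc < acc + 1 := Nat.lt_succ_self acc
            _ ≤ _ := pv_go_le sub fuel _ _
      · rename_i hp
        have hnp : ¬ sub <+: (h :: t) := by
          intro hc
          exact hp ((List.isPrefixOf_iff_prefix).mpr hc)
        rw [ih t acc (by simpa using Nat.le_of_succ_le_succ hl)]
        rw [List.infix_cons_iff]
        tauto

theorem pv_count_pos_iff (l sub : List Char) (hs : sub ≠ []) :
    0 < PySem.Chars.count l sub ↔ sub <:+: l := by
  unfold PySem.Chars.count
  rw [if_neg (by simpa [List.isEmpty_iff] using hs)]
  exact pv_go_lt_iff sub hs l.length l 0 (le_refl _)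

-- if a string never occurs in the content, neither does any extension of it
theorem pv_count_append_zero (content a b : String)
    (h : PySem.Str.count content a = 0) : PySem.Str.count content (a ++ b) = 0 := by
  have ha : a.toList ≠ [] := by
    intro hnil
    rw [PySem.Str.count_eq, hnil] at h
    simp [PySem.Chars.count] at h
  have hni : ¬ a.toList <:+: content.toList := by
    intro hinf
    rw [PySem.Str.count_eq] at h
    have := (pv_count_pos_iff content.toList a.toList ha).mpr hinf
    omega
  rw [PySem.Str.count_eq]
  by_contra hne
  have hpos : 0 < PySem.Chars.count content.toList (a ++ b).toList := Nat.pos_of_ne_zero hne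
  have hab : (a ++ b).toList = a.toList ++ b.toList := by simp
  have habne : (a ++ b).toList ≠ [] := by simp [hab, ha]
  have hinf := (pv_count_pos_iff content.toList (a ++ b).toList habne).mp hpos
  exact hni (List.IsInfix.trans (by rw [hab]; exact (List.prefix_append _ _).isInfix) hinf)

-- ---- pvOp facts ----

theorem pv_good_empty (content : String) : pvGood content PySem.Dict.empty := by
  intro s v h
  simp [PySem.Dict.get?_empty] at h

theorem pv_good_op (content : String) (d : PySem.Dict String Int) (s : String)
    (hg : pvGood content d) : pvGood content (pvOp content d s) := by
  unfold pvOp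
  split
  · exact hg
  · split
    · rename_i hc
      intro x v h
      rw [PySem.Dict.get?_insert] at h
      split at h
      · rename_i hx; subst hx
        cases h
        exact ⟨rfl, hc⟩
      · exact hg x v h
    · exact hg

theorem pv_good_foldl_op (content : String) (l : List String) : ∀ (d : PySem.Dict String Int),
    pvGood content d → pvGood content (l.foldl (pvOp content) d) := by
  induction l with
  | nil => intro d hg; exact hg
  | cons s t ih => intro d hg; exact ih _ (pv_good_op content d s hg)

theorem pv_op_contains_mono (content : String) (d : PySem.Dict String Int) (s x : String)
    (h : d.contains x = true) : (pvOp content d s).contains x = true := by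
  unfold pvOp
  split
  · exact h
  · split
    · rw [PySem.Dict.contains_insert, h]; simp
    · exact h

theorem pv_foldl_op_contains_mono (content : String) (l : List String) : ∀ (d : PySem.Dict String Int) (x : String),
    d.contains x = true → (l.foldl (pvOp content) d).contains x = true := by
  induction l with
  | nil => intro d x h; simpa using h
  | cons s t ih => intro d x h; exact ih _ _ (pv_op_contains_mono content d s x h)

theorem pv_op_noop (content : String) (d : PySem.Dict String Int) (s : String)
    (h : d.contains s = true ∨ PySem.Str.count content s = 0) : pvOp content d s = d := by
  unfold pvOp
  rcases h with h | h
  · rw [if_pos h]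
  · split
    · rfl
    · rw [if_neg (by rw [h]; decide)]

theorem pv_foldl_op_done (content : String) (l : List String) : ∀ (d : PySem.Dict String Int) (x : String),
    x ∈ l → (l.foldl (pvOp content) d).contains x = true ∨ PySem.Str.count content x = 0 := by
  induction l with
  | nil => intro d x h; cases h
  | cons s t ih =>
    intro d x h
    rcases List.mem_cons.mp h with rfl | hmem
    · by_cases h0 : PySem.Str.count content x = 0
      · exact Or.inr h0
      · left
        simp only [List.foldl_cons]
        apply pv_foldl_op_contains_mono
        unfold pvOp
        split
        · assumption
        · rw [if_pos (by omega)]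
          exact PySem.Dict.contains_insert_self _ _ _
    · exact ih _ x hmem

-- folding pvOp over the deduped candidates is folding it over all of them
theorem pv_foldl_op_ofList (content : String) (l : List String) (d : PySem.Dict String Int) :
    (PySem.Set.ofList l).foldl (pvOp content) d = l.foldl (pvOp content) d := by
  induction l using List.reverseRecOn with
  | nil => rfl
  | append_singleton xs x ih =>
    rw [PySem.Set.ofList_append_singleton, List.foldl_append]
    by_cases hmem : x ∈ PySem.Set.ofList xs
    · rw [PySem.Set.add_of_mem hmem, ih]
      have hx : x ∈ xs := (PySem.Set.mem_ofList _ _).mp hmem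
      simp only [List.foldl_cons, List.foldl_nil]
      rcases pv_foldl_op_done content xs d x hx with hc | h0
      · rw [pv_op_noop content _ x (Or.inl hc)]
      · rw [pv_op_noop content _ x (Or.inr h0)]
    · rw [PySem.Set.add_of_not_mem hmem, List.foldl_append, ih]

-- on fresh distinct keys B's unguarded step agrees with pvOp
theorem pv_foldl_opB_eq_op (content : String) (l : List String) : ∀ (d : PySem.Dict String Int),
    l.Nodup → (∀ s ∈ l, d.contains s = false) →
    l.foldl (pvOpB content) d = l.foldl (pvOp content) d := by
  induction l with
  | nil => intro d _ _; rfl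
  | cons s t ih =>
    intro d hnd hf
    simp only [List.foldl_cons]
    have hcs : d.contains s = false := hf s (List.mem_cons_self)
    have hop : pvOp content d s = pvOpB content d s := by
      unfold pvOp pvOpB
      rw [if_neg (by simp [hcs])]
    rw [hop]
    apply ih
    · exact (List.nodup_cons.mp hnd).2
    · intro x hx
      have hxs : x ≠ s := by
        intro rfl_; subst rfl_
        exact (List.nodup_cons.mp hnd).1 hx
      by_cases h1 : ((PySem.Str.count content s : Int)) ≥ 1
      · have hb : pvOpB content d s = d.insert s ((PySem.Str.count content s : Int)) := by
          simp only [pvOpB]; rw [if_pos h1]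
        rw [hb, PySem.Dict.contains_insert]
        simp [hxs, hf x (List.mem_cons_of_mem _ hx)]
      · have hb : pvOpB content d s = d := by simp only [pvOpB]; rw [if_neg h1]
        rw [hb]
        exact hf x (List.mem_cons_of_mem _ hx)

-- ---- A's step is pvOp on its (one or two) candidates ----

theorem pv_guard_eq (content : String) (d : PySem.Dict String Int) (s : String)
    (hg : pvGood content d) : (d.getD s (-1) == -1) = !d.contains s := by
  rw [PySem.Dict.getD_eq_get?_getD, PySem.Dict.contains_eq_isSome_get?]
  cases hq : d.get? s with
  | none => simp
  | some v =>
    have hv := hg s v hq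
    simp only [Option.getD_some, Option.isSome_some, Bool.not_true]
    have : v ≠ -1 := by omega
    simpa using this

theorem pv_s3block_eq (content : String) (d : PySem.Dict String Int) (s : String)
    (hg : pvGood content d) :
    (if d.getD s (-1) == -1 then
       (if ((PySem.Str.count content s : Int)) ≥ 1 then d.insert s ((PySem.Str.count content s : Int)) else d)
     else d) = pvOp content d s := by
  rw [pv_guard_eq content d s hg]
  unfold pvOp
  cases hc : d.contains s <;> simp

theorem pv_stepA_eq (corpus : List String) (content : String) (d : PySem.Dict String Int) (p : Int)
    (hg : pvGood content d) :
    pvStepA corpus content d p = (pvCands corpus p).foldl (pvOp content) d := by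
  simp only [pvStepA, pvCands, pvG3, pvG2]
  rw [pv_guard_eq content d _ hg]
  generalize hS2 : (PySem.List.pyGetD corpus p "" ++ PySem.List.pyGetD corpus (p + 1) "") = s2
  generalize hS3 : s2 ++ PySem.List.pyGetD corpus (p + 2) "" = s3
  have hzz : PySem.Str.count content s2 = 0 → PySem.Str.count content s3 = 0 := by
    intro h0
    rw [← hS3]
    exact pv_count_append_zero content _ _ h0
  by_cases hp : p + 2 < (corpus.length : Int)
  · simp only [if_pos hp, List.cons_append, List.nil_append, List.foldl_cons, List.foldl_nil]
    cases hc : d.contains s2 with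
    | true =>
      simp only [Bool.not_true, Bool.false_eq_true, if_false]
      rw [pv_op_noop content d s2 (Or.inl hc)]
      exact pv_s3block_eq content d s3 hg
    | false =>
      simp only [Bool.not_false, if_true]
      by_cases h1 : ((PySem.Str.count content s2 : Int)) ≥ 1
      · rw [if_pos h1]
        have hop : pvOp content d s2 = d.insert s2 ((PySem.Str.count content s2 : Int)) := by
          unfold pvOp
          rw [if_neg (by simp [hc]), if_pos h1]
        rw [← hop]
        exact pv_s3block_eq content _ s3 (pv_good_op content d s2 hg)
      · rw [if_neg h1]
        have hz : PySem.Str.count content s2 = 0 := by omega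
        rw [pv_op_noop content d s2 (Or.inr hz), pv_op_noop content d s3 (Or.inr (hzz hz))]
  · simp only [if_neg hp, List.append_nil, List.foldl_cons, List.foldl_nil]
    cases hc : d.contains s2 with
    | true =>
      simp only [Bool.not_true, Bool.false_eq_true, if_false]
      rw [pv_op_noop content d s2 (Or.inl hc)]
    | false =>
      simp only [Bool.not_false, if_true]
      by_cases h1 : ((PySem.Str.count content s2 : Int)) ≥ 1
      · rw [if_pos h1]
        unfold pvOp
        rw [if_neg (by simp [hc]), if_pos h1]
      · rw [if_neg h1]
        unfold pvOp
        rw [if_neg (by simp [hc]), if_neg h1]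

theorem pv_foldl_stepA (corpus : List String) (content : String) (ps : List Int) :
    ∀ d : PySem.Dict String Int, pvGood content d →
    ps.foldl (pvStepA corpus content) d = (ps.flatMap (pvCands corpus)).foldl (pvOp content) d := by
  induction ps with
  | nil => intro d _; rfl
  | cons p t ih =>
    intro d hg
    simp only [List.foldl_cons, List.flatMap_cons, List.foldl_append]
    rw [pv_stepA_eq corpus content d p hg]
    exact ih _ (pv_good_foldl_op content _ d hg)

-- ===== VERDICT (by name: the statement is the Claim_ definition above) =====
theorem searchCandidateSet_spec : Claim_equal_searchCandidateSet := by
  intro corpus content _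
  unfold Spec_searchCandidateSet
  show searchCandidateSet corpus content = searchCandidateSet_alt corpus content
  have hA : searchCandidateSet corpus content =
      ((PySem.List.pyRange 0 ((corpus.length : Int) - 1) 1).foldl
        (pvStepA corpus content) PySem.Dict.empty).items := rfl
  have hB : searchCandidateSet_alt corpus content =
      ((PySem.List.dedup ((PySem.List.pyRange 0 ((corpus.length : Int) - 1) 1).foldl
          (fun cands p => cands ++ pvCands corpus p) [])).foldl
        (pvOpB content) PySem.Dict.empty).items := rfl
  rw [hA, hB]
  rw [PySem.List.foldl_append_eq_flatMap (pvCands corpus), List.nil_append]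
  rw [PySem.List.dedup_eq_ofList]
  rw [pv_foldl_opB_eq_op content _ PySem.Dict.empty (PySem.Set.nodup_ofList _)
        (fun s _ => PySem.Dict.contains_empty s)]
  rw [pv_foldl_op_ofList]
  rw [pv_foldl_stepA corpus content _ PySem.Dict.empty (pv_good_empty content)]
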